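-- pv_equiv track=rewrite | github.com/srujanshenoy/MY_PYTHON_LEARNING_REPLACED | learning 6 - Learning Object Oriented Programming/oop2/utils.py | phone_to_text
-- ===== SOURCE A (Python) =====
-- def phone_to_text(phone_number):
--     # Convert phone number to spoken format
--
--     # Define the phone keypad dictionary
--     keypad = {
--         '0': 'zero',
--         '1': 'one',
--         '2': 'two',
--         '3': 'three',
--         '4': 'four',
--         '5': 'five',
--         '6': 'six',
--         '7': 'seven',
--         '8': 'eight',
--         '9': 'nine'
--     }
--
--     spoken_number = ''
--     prev_word = None
--     count = 1
--
--     for digit in phone_number: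
--         word = keypad.get(digit, '')
--         if len(word) > 0:
--             if word == prev_word:
--                 # Increment count for repeated words
--                 count += 1
--             else:
--                 # Add previous word and count to spoken number
--                 if prev_word is not None:
--                     if count > 1:
--                         spoken_number += f'double {prev_word} '
--                     else:
--                         spoken_number += f'{prev_word} '
--                 # Reset count for new word
--                 prev_word = word
--                 count = 1
--     # Add final word and count to spoken number
--     if prev_word is not None:
--         if count > 1:
--             spoken_number += f'double {prev_word} '
--         else:
--             spoken_number += f'{prev_word} '
--     return spoken_number.strip()
-- ===== SOURCE B (Python) =====
-- def phone_to_text(phone_number):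
--     # Group-then-map decomposition: build the filtered word list, split it
--     # into runs of equal words, render each run, join with spaces.
--     keypad = {
--         '0': 'zero', '1': 'one', '2': 'two', '3': 'three', '4': 'four',
--         '5': 'five', '6': 'six', '7': 'seven', '8': 'eight', '9': 'nine'
--     }
--     words = [keypad[d] for d in phone_number if d in keypad]
--     parts = []
--     i = 0
--     n = len(words)
--     while i < n:
--         j = i
--         while j < n and words[j] == words[i]:
--             j += 1
--         w = words[i]
--         parts.append(f'double {w}' if j - i > 1 else w)
--         i = j
--     return ' '.join(parts)
-- ===== Notes on version B (the rewrite author's own statement) =====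
-- stated objective: alternative
-- what changed: Replaces A's running prev_word/count accumulator with flush steps by a group-then-map decomposition: filter digits to a word list, split it into runs of equal words, map each run to its spoken part, and join the parts with single spaces (no trailing-space-plus-strip).
import Mathlib
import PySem

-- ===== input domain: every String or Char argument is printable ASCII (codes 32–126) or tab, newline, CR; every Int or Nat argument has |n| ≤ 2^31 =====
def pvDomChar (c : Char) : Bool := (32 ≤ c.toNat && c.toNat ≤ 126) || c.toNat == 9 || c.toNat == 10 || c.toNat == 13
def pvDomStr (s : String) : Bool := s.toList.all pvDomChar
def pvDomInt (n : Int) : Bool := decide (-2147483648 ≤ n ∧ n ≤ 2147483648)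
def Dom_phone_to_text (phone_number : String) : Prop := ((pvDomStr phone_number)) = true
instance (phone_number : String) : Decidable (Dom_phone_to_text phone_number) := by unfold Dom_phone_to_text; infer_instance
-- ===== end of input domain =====

-- B replaces A's running prev_word/count accumulator-and-flush with a group-then-map
-- decomposition (filter to words, split into runs, render each run, join); same cost.

-- ===== PORT A =====
-- the keypad dictionary literal (shared by both ports; both Pythons define the same literal)
def keypadDict : PySem.Dict Char (List Char) :=
  PySem.Dict.mk [('0', "zero".toList), ('1', "one".toList), ('2', "two".toList),
    ('3', "three".toList), ('4', "four".toList), ('5', "five".toList),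
    ('6', "six".toList), ('7', "seven".toList), ('8', "eight".toList), ('9', "nine".toList)]

-- A's "add previous word and count to spoken number" block (also the final flush)
def flushA (spoken : List Char) (prev : Option (List Char)) (count : Int) : List Char :=
  match prev with
  | some p => spoken ++ (if count > 1 then "double ".toList ++ p ++ [' '] else p ++ [' '])
  | none => spoken

-- A's loop body over one character
def stepA (st : List Char × Option (List Char) × Int) (digit : Char) :
    List Char × Option (List Char) × Int :=
  let word := keypadDict.getD digit []
  if word.length > 0 then
    if some word == st.2.1 then (st.1, st.2.1, st.2.2 + 1)
    else (flushA st.1 st.2.1 st.2.2, some word, 1)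
  else st

def phone_to_text (phone_number : String) : String :=
  let st := phone_number.toList.foldl stepA ([], none, 1)
  String.ofList (PySem.Chars.strip (flushA st.1 st.2.1 st.2.2))

-- ===== PORT B =====
-- B's while loop: consume one run of equal words, emit its spoken part
def runsAlt (words : List (List Char)) : List (List Char) :=
  match words with
  | [] => []
  | w :: ws =>
    (if (ws.takeWhile (· == w)).length + 1 > 1 then "double ".toList ++ w else w)
      :: runsAlt (ws.dropWhile (· == w))
termination_by words.length
decreasing_by
  have := List.length_dropWhile_le (p := (· == w)) (l := ws)
  simp; omega

def phone_to_text_alt (phone_number : String) : String :=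
  let words := (phone_number.toList.filter (fun c => keypadDict.contains c)).map
      (fun c => keypadDict.getD c [])
  String.ofList (PySem.Chars.join " ".toList (runsAlt words))

-- ===== PRECONDITION & SPEC =====
def Spec_phone_to_text (phone_number : String) (out : String) : Prop := out = phone_to_text_alt phone_number
instance (phone_number : String) (out : String) : Decidable (Spec_phone_to_text phone_number out) := by unfold Spec_phone_to_text; infer_instance

-- ===== CLAIM (what is proved, stated in full; the proofs are below) =====
def Claim_equal_phone_to_text : Prop := ∀ (phone_number : String), Dom_phone_to_text phone_number → Spec_phone_to_text phone_number (phone_to_text phone_number)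

-- ===== LEMMAS AND PROOFS =====

-- the filtered word list both sides compute over
def wordsOf (cs : List Char) : List (List Char) :=
  (cs.filter (fun c => keypadDict.contains c)).map (fun c => keypadDict.getD c [])

-- A's loop body restricted to an already-looked-up nonempty word
def stepW (st : List Char × Option (List Char) × Int) (w : List Char) :
    List Char × Option (List Char) × Int :=
  if some w == st.2.1 then (st.1, st.2.1, st.2.2 + 1)
  else (flushA st.1 st.2.1 st.2.2, some w, 1)

-- runs with their lengths
def runsOf (words : List (List Char)) : List (List Char × Nat) :=
  match words with
  | [] => []
  | w :: ws => (w, (ws.takeWhile (· == w)).length + 1) :: runsOf (ws.dropWhile (· == w))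
termination_by words.length
decreasing_by
  have := List.length_dropWhile_le (p := (· == w)) (l := ws)
  simp; omega

def partOf (r : List Char × Nat) : List Char :=
  if r.2 > 1 then "double ".toList ++ r.1 else r.1

def renderR (rs : List (List Char × Nat)) : List Char :=
  (rs.map (fun r => partOf r ++ [' '])).flatten

-- nonempty, with non-space first and last character
def GoodW (w : List Char) : Prop :=
  w ≠ [] ∧ PySem.Chars.isspace w.headI = false ∧ PySem.Chars.isspace w.reverse.headI = false

theorem good_word (c : Char) (h : keypadDict.contains c = true) :
    GoodW (keypadDict.getD c []) := by
  rw [PySem.Dict.contains_eq_decide_mem_keys] at h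
  simp [keypadDict, PySem.Dict.keys_mk] at h
  rcases h with h|h|h|h|h|h|h|h|h|h <;> subst h <;> exact ⟨by decide, by decide, by decide⟩

theorem word_ne_nil (c : Char) (h : keypadDict.contains c = true) :
    (keypadDict.getD c []).length > 0 := by
  have := (good_word c h).1
  cases hk : keypadDict.getD c [] with
  | nil => exact absurd hk this
  | cons a t => simp

theorem foldl_stepA_eq (cs : List Char) :
    ∀ st, cs.foldl stepA st = (wordsOf cs).foldl stepW st := by
  induction cs with
  | nil => intro st; simp [wordsOf]
  | cons c cs ih =>
    intro st
    by_cases h : keypadDict.contains c = true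
    · have hlen := word_ne_nil c h
      have hst : stepA st c = stepW st (keypadDict.getD c []) := by
        simp [stepA, stepW, hlen]
      have hwcons : wordsOf (c :: cs) = keypadDict.getD c [] :: wordsOf cs := by
        simp [wordsOf, h]
      rw [List.foldl_cons, hst, ih, hwcons, List.foldl_cons]
    · have hf : keypadDict.contains c = false := by
        cases hc : keypadDict.contains c
        · rfl
        · exact absurd hc h
      have hd : keypadDict.getD c [] = [] :=
        PySem.Dict.getD_of_not_contains keypadDict [] hf
      have : stepA st c = st := by simp [stepA, hd]
      simp only [wordsOf, List.filter_cons, hf, List.foldl_cons, this]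
      exact ih st

theorem flush_eq (spoken p : List Char) (c : Int) (hc : 1 ≤ c) :
    flushA spoken (some p) c = spoken ++ partOf (p, c.toNat) ++ [' '] := by
  by_cases h : 1 < c
  · have h' : c.toNat > 1 := by omega
    simp [flushA, partOf, h, h']
  · have h' : ¬ c.toNat > 1 := by omega
    simp [flushA, partOf, h, h']

theorem foldl_stepW_run (ws : List (List Char)) :
    ∀ (p spoken : List Char) (c : Int), 1 ≤ c →
    (fun st => flushA st.1 st.2.1 st.2.2) (ws.foldl stepW (spoken, some p, c))
      = spoken ++ renderR ((p, c.toNat + (ws.takeWhile (· == p)).length)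
          :: runsOf (ws.dropWhile (· == p))) := by
  induction ws with
  | nil =>
    intro p spoken c hc
    show flushA spoken (some p) c = _
    rw [flush_eq spoken p c hc]
    simp [renderR, runsOf, List.append_assoc]
  | cons w ws ih =>
    intro p spoken c hc
    by_cases hw : w = p
    · subst hw
      have hb : (some w == some w) = true := by simp
      have hstep : stepW (spoken, some w, c) w = (spoken, some w, c + 1) := by
        simp [stepW]
      rw [List.foldl_cons, hstep, ih w spoken (c + 1) (by omega)]
      have htw : (w :: ws).takeWhile (· == w) = w :: ws.takeWhile (· == w) := by
        simp
      have hdw : (w :: ws).dropWhile (· == w) = ws.dropWhile (· == w) := by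
        simp
      rw [htw, hdw]
      have hlen : (c + 1).toNat + (ws.takeWhile (· == w)).length
          = c.toNat + (w :: ws.takeWhile (· == w)).length := by
        simp only [List.length_cons]; omega
      rw [hlen]
    · have hb : (some w == some p) = false := by simp [hw]
      have hstep : stepW (spoken, some p, c) w
          = (flushA spoken (some p) c, some w, 1) := by
        simp [stepW, hb]
      rw [List.foldl_cons, hstep, ih w _ 1 (by omega)]
      have htw : (w :: ws).takeWhile (· == p) = [] := by
        simp [hw]
      have hdw : (w :: ws).dropWhile (· == p) = w :: ws := by
        simp [hw]
      rw [htw, hdw, flush_eq spoken p c hc]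
      conv_rhs => rw [runsOf]
      have h1 : (1 : Int).toNat + (ws.takeWhile (· == w)).length
          = (ws.takeWhile (· == w)).length + 1 := by omega
      rw [h1]
      simp [renderR, List.append_assoc]

theorem runsAlt_eq (ws : List (List Char)) : runsAlt ws = (runsOf ws).map partOf := by
  induction ws using runsAlt.induct with
  | case1 => simp [runsAlt, runsOf]
  | case2 w ws ih =>
    rw [runsAlt, runsOf]
    simp only [List.map_cons, partOf, ih]

theorem mem_runsOf (ws : List (List Char)) :
    ∀ r ∈ runsOf ws, r.1 ∈ ws := by
  induction ws using runsOf.induct with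
  | case1 => simp [runsOf]
  | case2 w ws ih =>
    intro r hr
    rw [runsOf] at hr
    rcases List.mem_cons.mp hr with h | h
    · subst h; exact List.mem_cons_self
    · exact List.mem_cons_of_mem _ ((ws.dropWhile_sublist (· == w)).mem (ih r h))

theorem good_mem_wordsOf (cs : List Char) : ∀ w ∈ wordsOf cs, GoodW w := by
  intro w hw
  simp only [wordsOf, List.mem_map, List.mem_filter] at hw
  obtain ⟨c, ⟨_, hc⟩, rfl⟩ := hw
  exact good_word c hc

theorem headI_append {α : Type} [Inhabited α] (xs ys : List α) (h : xs ≠ []) :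
    (xs ++ ys).headI = xs.headI := by
  cases xs with
  | nil => exact absurd rfl h
  | cons a t => rfl

theorem good_part (w : List Char) (n : Nat) (h : GoodW w) : GoodW (partOf (w, n)) := by
  obtain ⟨hne, hh, hl⟩ := h
  unfold partOf
  by_cases hn : n > 1
  · simp only [hn, if_true]
    refine ⟨by simp, ?_, ?_⟩
    · rw [headI_append _ _ (by decide)]; decide
    · rw [List.reverse_append, headI_append _ _ (by simp [hne])]
      exact hl
  · simp only [hn, if_false]
    exact ⟨hne, hh, hl⟩

theorem good_join (parts : List (List Char)) (hne : parts ≠ [])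
    (hg : ∀ p ∈ parts, GoodW p) : GoodW (PySem.Chars.join [' '] parts) := by
  induction parts with
  | nil => exact absurd rfl hne
  | cons p ps ih =>
    cases ps with
    | nil =>
      simpa [PySem.Chars.join, List.intercalate] using hg p (by simp)
    | cons q qs =>
      have hgp := hg p (by simp)
      have hj : PySem.Chars.join [' '] (p :: q :: qs)
          = p ++ [' '] ++ PySem.Chars.join [' '] (q :: qs) :=
        PySem.Chars.join_cons_cons [' '] p q qs
      have hrec : GoodW (PySem.Chars.join [' '] (q :: qs)) :=
        ih (by simp) (fun x hx => hg x (List.mem_cons_of_mem _ hx))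
      obtain ⟨hne1, hh1, hl1⟩ := hgp
      obtain ⟨hne2, hh2, hl2⟩ := hrec
      refine ⟨?_, ?_, ?_⟩
      · rw [hj]; simp [hne1]
      · rw [hj, List.append_assoc, headI_append _ _ hne1]; exact hh1
      · rw [hj, List.reverse_append, headI_append _ _ (by simp [hne2])]
        exact hl2

theorem strip_good_append_space (j : List Char) (h : GoodW j) :
    PySem.Chars.strip (j ++ [' ']) = j := by
  obtain ⟨hne, hh, hl⟩ := h
  obtain ⟨a, t, rfl⟩ : ∃ a t, j = a :: t := by
    cases j with
    | nil => exact absurd rfl hne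
    | cons a t => exact ⟨a, t, rfl⟩
  simp only [List.headI] at hh
  have h1 : PySem.Chars.lstrip ((a :: t) ++ [' ']) = (a :: t) ++ [' '] := by
    simp [PySem.Chars.lstrip, hh]
  unfold PySem.Chars.strip
  rw [h1]
  unfold PySem.Chars.rstrip
  have hrev : ((a :: t) ++ [' ']).reverse = ' ' :: (a :: t).reverse := by simp
  rw [hrev]
  obtain ⟨b, u, hbu⟩ : ∃ b u, (a :: t).reverse = b :: u := by
    cases hr : (a :: t).reverse with
    | nil => exact absurd (List.reverse_eq_nil_iff.mp hr) (by simp)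
    | cons b u => exact ⟨b, u, rfl⟩
  rw [hbu] at hl ⊢
  simp only [List.headI] at hl
  rw [List.dropWhile_cons, List.dropWhile_cons]
  simp only [hl, show PySem.Chars.isspace ' ' = true from rfl, if_true]
  simp [← hbu]

theorem renderR_eq_join (rs : List (List Char × Nat)) (h : rs ≠ []) :
    renderR rs = PySem.Chars.join [' '] (rs.map partOf) ++ [' '] := by
  induction rs with
  | nil => exact absurd rfl h
  | cons r rs ih =>
    cases rs with
    | nil => simp [renderR, PySem.Chars.join, List.intercalate]
    | cons r' rs' =>
      have hr := ih (by simp)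
      simp only [List.map_cons] at hr ⊢
      rw [PySem.Chars.join_cons_cons, List.append_assoc, ← hr]
      simp [renderR, List.append_assoc]

-- ===== VERDICT (by name: the statement is the Claim_ definition above) =====
theorem phone_to_text_spec : Claim_equal_phone_to_text := by
  intro s _
  show phone_to_text s = phone_to_text_alt s
  have hA : phone_to_text s = String.ofList (PySem.Chars.strip
      ((fun st => flushA st.1 st.2.1 st.2.2)
        (List.foldl stepW ([], none, 1) (wordsOf s.toList)))) := by
    unfold phone_to_text
    rw [foldl_stepA_eq]
  have hB : phone_to_text_alt s = String.ofList
      (PySem.Chars.join [' '] ((runsOf (wordsOf s.toList)).map partOf)) := by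
    unfold phone_to_text_alt
    show String.ofList (PySem.Chars.join " ".toList (runsAlt (wordsOf s.toList))) = _
    rw [runsAlt_eq]
    rfl
  rw [hA, hB]
  cases hws : wordsOf s.toList with
  | nil =>
    simp [runsOf, flushA, PySem.Chars.strip, PySem.Chars.lstrip, PySem.Chars.rstrip,
      PySem.Chars.join, List.intercalate]
  | cons w ws =>
    have hgood : ∀ x ∈ w :: ws, GoodW x := by
      rw [← hws]; exact good_mem_wordsOf s.toList
    have hstep0 : stepW ([], none, 1) w = ([], some w, 1) := by
      simp [stepW, flushA]
    rw [List.foldl_cons, hstep0, foldl_stepW_run ws w [] 1 (by omega)]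
    have hruns : (w, (1 : Int).toNat + (ws.takeWhile (· == w)).length)
        :: runsOf (ws.dropWhile (· == w)) = runsOf (w :: ws) := by
      rw [runsOf]
      congr 2
      omega
    rw [hruns]
    have hrne : runsOf (w :: ws) ≠ [] := by rw [runsOf]; simp
    rw [List.nil_append, renderR_eq_join _ hrne]
    have hgj : GoodW (PySem.Chars.join [' '] ((runsOf (w :: ws)).map partOf)) := by
      apply good_join
      · simp [hrne]
      · intro p hp
        obtain ⟨r, hr, rfl⟩ := List.mem_map.mp hp
        exact good_part r.1 r.2 (hgood r.1 (mem_runsOf _ r hr))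
    rw [strip_good_append_space _ hgj]
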